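-- pv_equiv track=rewrite | github.com/Srinjana/CC_practice | MISC/TCS extra/chocolate_distri.py | minOpers
-- ===== SOURCE A (Python) =====
-- def minOpers(interns, target):
--     count = 0
--     for curr in interns:
--         if curr - target >= 5:
--             count += (curr - target) // 5
--             curr = target + (curr - target) % 5
--         if curr - target >= 2:
--             count += (curr - target) // 2
--             curr = target + (curr - target) % 2
--         if curr - target == 1:
--             count += 1
--     return count
-- ===== SOURCE B (Python) =====
-- def _divmod_sub(d, m):
--     # Egyptian division: quotient and remainder of d by m (d >= 0, m > 0)
--     # via recursive doubling and subtraction; no // or % used.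
--     if d < m:
--         return 0, d
--     q, r = _divmod_sub(d, 2 * m)
--     q *= 2
--     if r >= m:
--         q += 1
--         r -= m
--     return q, r
--
-- def minOpers(interns, target):
--     count = 0
--     for curr in interns:
--         d = curr - target
--         if d > 0:
--             q5, r = _divmod_sub(d, 5)
--             q2, r = _divmod_sub(r, 2)
--             count += q5 + q2 + r
--     return count
-- ===== Notes on version B (the rewrite author's own statement) =====
-- stated objective: alternative
-- what changed: Replaces A's staged //-and-%-with-residual-mutation by a recursive Egyptian (doubling/subtraction) division helper: each positive surplus is divided by 5 and its remainder by 2 purely by doubling and subtracting, with the final remainder (0 or 1) added directly; no // or % is used.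
import Mathlib
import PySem

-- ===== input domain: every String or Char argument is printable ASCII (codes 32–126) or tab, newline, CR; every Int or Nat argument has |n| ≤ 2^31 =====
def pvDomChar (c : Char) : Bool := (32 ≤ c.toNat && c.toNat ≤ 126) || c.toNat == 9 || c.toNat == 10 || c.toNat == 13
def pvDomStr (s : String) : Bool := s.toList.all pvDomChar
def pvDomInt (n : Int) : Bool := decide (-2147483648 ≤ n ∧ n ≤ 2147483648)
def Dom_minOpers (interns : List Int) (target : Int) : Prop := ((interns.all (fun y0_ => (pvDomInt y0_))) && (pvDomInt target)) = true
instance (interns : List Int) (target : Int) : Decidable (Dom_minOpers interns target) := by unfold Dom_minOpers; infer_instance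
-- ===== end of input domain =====

-- B replaces A's //-and-%-with-residual-mutation stages by a recursive Egyptian
-- (doubling/subtraction) division helper; no // or % is used (objective: alternative).

-- ===== PORT A =====
def minOpers (interns : List Int) (target : Int) : Int :=
  interns.foldl (fun count curr =>
    let s1 :=
      if curr - target ≥ 5 then
        (count + PySem.Int.floordiv (curr - target) 5, target + PySem.Int.mod (curr - target) 5)
      else (count, curr)
    let s2 :=
      if s1.2 - target ≥ 2 then
        (s1.1 + PySem.Int.floordiv (s1.2 - target) 2, target + PySem.Int.mod (s1.2 - target) 2)
      else s1
    if s2.2 - target = 1 then s2.1 + 1 else s2.1) 0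

-- ===== PORT B =====
-- Egyptian division of d by m by recursive doubling; the `0 < m` conjunct is a
-- totality guard only (every call site has m > 0, where it is vacuously true).
def pvDivmodSub (d m : Int) : Int × Int :=
  if h : 0 < m ∧ m ≤ d then
    let p := pvDivmodSub d (2 * m)
    if p.2 ≥ m then (2 * p.1 + 1, p.2 - m) else (2 * p.1, p.2)
  else (0, d)
termination_by (d - m + 1).toNat
decreasing_by omega

def minOpers_alt (interns : List Int) (target : Int) : Int :=
  interns.foldl (fun count curr =>
    let d := curr - target
    if 0 < d then
      let p5 := pvDivmodSub d 5
      let p2 := pvDivmodSub p5.2 2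
      count + (p5.1 + p2.1 + p2.2)
    else count) 0

-- ===== PRECONDITION & SPEC =====
def Spec_minOpers (interns : List Int) (target : Int) (out : Int) : Prop := out = minOpers_alt interns target
instance (interns : List Int) (target : Int) (out : Int) : Decidable (Spec_minOpers interns target out) := by unfold Spec_minOpers; infer_instance

-- ===== CLAIM (what is proved, stated in full; the proofs are below) =====
def Claim_equal_minOpers : Prop := ∀ (interns : List Int) (target : Int), Dom_minOpers interns target → Spec_minOpers interns target (minOpers interns target)

-- ===== LEMMAS AND PROOFS =====

-- Egyptian division computes true floor division and remainder (for 0 ≤ d, 0 < m)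
theorem pvDivmodSub_eq (d m : Int) (hm : 0 < m) (hd : 0 ≤ d) :
    pvDivmodSub d m = (d / m, d % m) := by
  rw [pvDivmodSub]
  split_ifs with h
  · have ih := pvDivmodSub_eq d (2 * m) (by omega) hd
    rw [ih]
    have hd2 : 2 * m * (d / (2 * m)) + d % (2 * m) = d := Int.ediv_add_emod d (2 * m)
    have hr0 : 0 ≤ d % (2 * m) := Int.emod_nonneg d (by omega)
    have hr1 : d % (2 * m) < 2 * m := Int.emod_lt_of_pos d (by omega)
    set q := d / (2 * m) with hq
    set r := d % (2 * m) with hr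
    have hdecomp : d = r + m * (2 * q) := by linarith
    have hdiv : d / m = r / m + 2 * q := by
      rw [hdecomp, Int.add_mul_ediv_left _ _ (by omega : m ≠ 0)]
    have hmod : d % m = r % m := by
      rw [hdecomp, Int.add_mul_emod_self_left]
    show (if r ≥ m then ((2 * q + 1 : Int), r - m) else (2 * q, r)) = (d / m, d % m)
    split_ifs with hge
    · -- m ≤ r < 2m : r / m = 1 and r % m = r - m
      have hrm : r = (r - m) + m * 1 := by ring
      have h1 : r / m = 1 := by
        rw [hrm, Int.add_mul_ediv_left _ _ (by omega : m ≠ 0),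
            Int.ediv_eq_zero_of_lt (by omega) (by omega)]
        omega
      have h2 : r % m = r - m := by
        rw [hrm, Int.add_mul_emod_self_left, Int.emod_eq_of_lt (by omega) (by omega)]
        omega
      refine Prod.ext ?_ ?_ <;> simp [hdiv, hmod, h1, h2] <;> ring
    · -- 0 ≤ r < m
      have h1 : r / m = 0 := Int.ediv_eq_zero_of_lt (by omega) (by omega)
      have h2 : r % m = r := Int.emod_eq_of_lt (by omega) (by omega)
      refine Prod.ext ?_ ?_ <;> simp [hdiv, hmod, h1, h2] <;> ring
  · have hdm : d < m := by omega
    refine Prod.ext ?_ ?_ <;> simp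
    · exact (Int.ediv_eq_zero_of_lt hd hdm).symm
    · exact (Int.emod_eq_of_lt hd hdm).symm
termination_by (d - m + 1).toNat
decreasing_by omega

-- A's loop body and B's loop body agree on every (count, curr)
theorem pvStep_eq (target count curr : Int) :
    (let s1 :=
      if curr - target ≥ 5 then
        (count + PySem.Int.floordiv (curr - target) 5, target + PySem.Int.mod (curr - target) 5)
      else (count, curr)
    let s2 :=
      if s1.2 - target ≥ 2 then
        (s1.1 + PySem.Int.floordiv (s1.2 - target) 2, target + PySem.Int.mod (s1.2 - target) 2)
      else s1
    if s2.2 - target = 1 then s2.1 + 1 else s2.1)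
    = (let d := curr - target
       if 0 < d then
         let p5 := pvDivmodSub d 5
         let p2 := pvDivmodSub p5.2 2
         count + (p5.1 + p2.1 + p2.2)
       else count) := by
  have d5 : ∀ a : Int, PySem.Int.floordiv a 5 = a / 5 :=
    fun a => PySem.Int.floordiv_eq_ediv_of_pos (by norm_num)
  have m5 : ∀ a : Int, PySem.Int.mod a 5 = a % 5 :=
    fun a => PySem.Int.mod_eq_emod_of_pos (by norm_num)
  have d2 : ∀ a : Int, PySem.Int.floordiv a 2 = a / 2 :=
    fun a => PySem.Int.floordiv_eq_ediv_of_pos (by norm_num)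
  have m2 : ∀ a : Int, PySem.Int.mod a 2 = a % 2 :=
    fun a => PySem.Int.mod_eq_emod_of_pos (by norm_num)
  by_cases hd : 0 < curr - target
  · have h5 := pvDivmodSub_eq (curr - target) 5 (by norm_num) (by omega)
    have h2' := pvDivmodSub_eq ((curr - target) % 5) 2 (by norm_num)
      (Int.emod_nonneg _ (by norm_num))
    simp only [hd, if_pos, h5, h2', d5, m5, d2, m2]
    split_ifs <;> omega
  · simp only [if_neg hd, d5, m5, d2, m2]
    split_ifs <;> omega

-- ===== VERDICT (by name: the statement is the Claim_ definition above) =====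
theorem minOpers_spec : Claim_equal_minOpers := by
  intro interns target _
  unfold Spec_minOpers minOpers minOpers_alt
  congr 1
  funext count curr
  exact pvStep_eq target count curr
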